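-- pv_equiv track=rewrite | github.com/vit-aborigen/CIO_woplugin | Ground-for-the-House.py | house
-- ===== SOURCE A (Python) =====
-- def house(plan):
--     if '#' not in plan: return 0
--     top, bottom, left, right = 1000, -1, 1000, -1
--
--     for idx, line in enumerate(plan[1:].splitlines()):
--         if '#' in line:
--             top = min(top, idx)
--             bottom = max(bottom, idx)
--             left = min(left, line.find('#'))
--             right = max(right, line.rfind('#'))
--     return (bottom - top + 1) * (right - left + 1)
-- ===== SOURCE B (Python) =====
-- def house(plan):
--     lines = plan[1:].splitlines()
--     while lines and '#' not in lines[0]: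
--         lines.pop(0)
--     while lines and '#' not in lines[-1]:
--         lines.pop()
--     width = max((len(line) for line in lines), default=0)
--     cols = [''.join(line[j] if j < len(line) else ' ' for line in lines)
--             for j in range(width)]
--     while cols and '#' not in cols[0]:
--         cols.pop(0)
--     while cols and '#' not in cols[-1]:
--         cols.pop()
--     return len(lines) * len(cols)
-- ===== Notes on version B (the rewrite author's own statement) =====
-- stated objective: alternative
-- what changed: B crops the grid instead of tracking extremes: it trims '#'-free lines from both ends of plan[1:].splitlines(), builds explicit transposed column strings, trims '#'-free columns from both ends, and returns remaining height times remaining width -- no min/max, no find/rfind, no running bounds.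
-- intended difference: When plan[1:] contains no '#' at all (e.g. the only '#' is plan's first character, dropped by the slice), or every '#' of plan[1:] lies beyond row index 1000 or beyond column index 1000, A's 1000/-1 sentinel initialisation leaks into the returned area (A returns 1000000 for plan='#'); B returns the true bounding-box area of the '#' cells of plan[1:] (0 when there are none), which is the intended value. — e.g. on house("#"): A returns 1000000, B returns 0
import Mathlib
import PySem

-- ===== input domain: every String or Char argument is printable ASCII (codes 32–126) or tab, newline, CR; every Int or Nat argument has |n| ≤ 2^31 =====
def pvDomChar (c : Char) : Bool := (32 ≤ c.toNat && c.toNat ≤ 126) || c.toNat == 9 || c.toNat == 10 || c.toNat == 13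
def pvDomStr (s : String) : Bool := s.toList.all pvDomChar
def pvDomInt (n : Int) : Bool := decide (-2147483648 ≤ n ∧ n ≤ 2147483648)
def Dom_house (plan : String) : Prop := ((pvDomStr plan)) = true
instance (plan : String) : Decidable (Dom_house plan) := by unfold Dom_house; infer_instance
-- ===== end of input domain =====

-- B crops the grid instead of tracking extremes: it trims '#'-free lines from both ends of
-- plan[1:].splitlines(), builds explicit transposed column strings, trims '#'-free columns
-- from both ends, and returns remaining height * remaining width (no min/max, no find/rfind);
-- where A's 1000/-1 sentinels leak into the result (no '#' in plan[1:], or all extremes beyond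
-- index 1000) B returns the true bounding-box area (the intended difference D_house below).

-- ===== PORT A =====
def pvAStep (st : Int × Int × Int × Int) (p : Int × String) : Int × Int × Int × Int :=
  if PySem.Str.isIn "#" p.2 then
    (min st.1 p.1, max st.2.1 p.1,
     min st.2.2.1 (PySem.Str.find p.2 "#"), max st.2.2.2 (PySem.Str.rfind p.2 "#"))
  else st

def pvAFinish (st : Int × Int × Int × Int) : Int :=
  (st.2.1 - st.1 + 1) * (st.2.2.2 - st.2.2.1 + 1)

def house (plan : String) : Int :=
  if PySem.Str.isIn "#" plan = false then 0
  else
    pvAFinish ((PySem.List.enumerate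
        (PySem.Str.splitlines (PySem.Str.slice plan (some 1) none)) 0).foldl
        pvAStep (1000, -1, 1000, -1))

-- ===== PORT B =====
-- `while xs and '#' not in xs[0]: xs.pop(0)` as the obvious structural recursion
def pvTrimF : List String → List String
  | [] => []
  | l :: ls => if PySem.Str.isIn "#" l then l :: ls else pvTrimF ls

-- front trim then back trim (the back `while … xs.pop()` runs on the reversed list)
def pvTrim (xs : List String) : List String :=
  (pvTrimF ((pvTrimF xs).reverse)).reverse

def house_alt (plan : String) : Int :=
  let lines := pvTrim (PySem.Str.splitlines (PySem.Str.slice plan (some 1) none))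
  -- max((len(line) for line in lines), default=0): exact, all lengths are ≥ 0
  let width := lines.foldl (fun acc l => max acc l.toList.length) 0
  -- cols[j] = ''.join(line[j] if j < len(line) else ' ' for line in lines)
  let cols := pvTrim ((List.range width).map (fun j =>
      String.ofList (lines.map (fun l => l.toList.getD j ' '))))
  (lines.length : Int) * (cols.length : Int)

-- ===== PRECONDITION & SPEC =====
-- When plan[1:] has no '#' at all (e.g. the only '#' is plan's first character, dropped by the
-- slice), or all '#' of plan[1:] lie beyond row index 1000 or all beyond column index 1000, A's
-- 1000/-1 sentinel initialisation leaks into the returned area (1000000 for plan = "#"); B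
-- returns the true bounding-box area of the '#' cells of plan[1:] (0 when there are none),
-- which is the intended value.
def D_house (plan : String) : Prop :=
  let tl := plan.toList.drop 1
  let ls := PySem.Chars.splitlines tl
  ('#' ∈ plan.toList ∧ '#' ∉ tl) ∨
  ('#' ∈ tl ∧ ((∀ l ∈ ls.take 1001, '#' ∉ l) ∨ ∀ l ∈ ls, '#' ∉ l.take 1001))
instance (plan : String) : Decidable (D_house plan) := by unfold D_house; infer_instance

def Spec_house (plan : String) (out : Int) : Prop := ¬ D_house plan → out = house_alt plan
instance (plan : String) (out : Int) : Decidable (Spec_house plan out) := by unfold Spec_house; infer_instance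

def pvDiffWitness_house : String := "#"
def pvDiffWitnessOut_house : Int × Int := (1000000, 0)

-- ===== CLAIM (what is proved, stated in full; the proofs are below) =====
def Claim_unchanged_house : Prop := ∀ (plan : String), Dom_house plan → Spec_house plan (house plan)
def Claim_changed_house : Prop := Dom_house (pvDiffWitness_house) ∧ D_house (pvDiffWitness_house) ∧ house (pvDiffWitness_house) = pvDiffWitnessOut_house.1 ∧ house_alt (pvDiffWitness_house) = pvDiffWitnessOut_house.2 ∧ pvDiffWitnessOut_house.1 ≠ pvDiffWitnessOut_house.2

-- ===== LEMMAS AND PROOFS =====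

-- generic fold facts (over any linear order, used at Int and Nat)
theorem pvFoldlMinMin {α : Type} [LinearOrder α] (rs : List α) (a r0 : α) :
    rs.foldl min (min a r0) = min a (rs.foldl min r0) := by
  induction rs generalizing r0 with
  | nil => rfl
  | cons x rs ih => simpa [List.foldl_cons, min_assoc] using ih (min r0 x)

theorem pvFoldlMinLeInit {α : Type} [LinearOrder α] (rs : List α) (a : α) : rs.foldl min a ≤ a := by
  induction rs generalizing a with
  | nil => simp
  | cons x rs ih => exact le_trans (ih (min a x)) (min_le_left _ _)

theorem pvFoldlMinLeMem {α : Type} [LinearOrder α] (rs : List α) (a m : α) (hm : m ∈ rs) :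
    rs.foldl min a ≤ m := by
  induction rs generalizing a with
  | nil => simp at hm
  | cons x rs ih =>
    rcases List.mem_cons.1 hm with h | h
    · subst h; exact le_trans (pvFoldlMinLeInit rs (min a m)) (min_le_right _ _)
    · exact ih (min a x) h

theorem pvFoldlMinLe {α : Type} [LinearOrder α] (rs : List α) (r0 m : α) (hm : m ∈ r0 :: rs) :
    rs.foldl min r0 ≤ m := by
  rcases List.mem_cons.1 hm with h | h
  · subst h; exact pvFoldlMinLeInit _ _
  · exact pvFoldlMinLeMem _ _ _ h

theorem pvFoldlMinGe {α : Type} [LinearOrder α] (rs : List α) (a b : α) (ha : b ≤ a)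
    (h : ∀ y ∈ rs, b ≤ y) : b ≤ rs.foldl min a := by
  induction rs generalizing a with
  | nil => simpa
  | cons x rs ih =>
    exact ih (min a x) (le_min ha (h x List.mem_cons_self)) (fun y hy => h y (List.mem_cons_of_mem _ hy))

theorem pvFoldlMaxLeInit {α : Type} [LinearOrder α] (rs : List α) (a : α) : a ≤ rs.foldl max a := by
  induction rs generalizing a with
  | nil => simp
  | cons x rs ih => exact le_trans (le_max_left _ _) (ih (max a x))

theorem pvFoldlMaxLeMem {α : Type} [LinearOrder α] (rs : List α) (a m : α) (hm : m ∈ rs) :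
    m ≤ rs.foldl max a := by
  induction rs generalizing a with
  | nil => simp at hm
  | cons x rs ih =>
    rcases List.mem_cons.1 hm with h | h
    · subst h; exact le_trans (le_max_right a m) (pvFoldlMaxLeInit rs (max a m))
    · exact ih (max a x) h

theorem pvFoldlMaxLe {α : Type} [LinearOrder α] (rs : List α) (r0 m : α) (hm : m ∈ r0 :: rs) :
    m ≤ rs.foldl max r0 := by
  rcases List.mem_cons.1 hm with h | h
  · subst h; exact pvFoldlMaxLeInit _ _
  · exact pvFoldlMaxLeMem _ _ _ h

theorem pvFoldlMaxGe {α : Type} [LinearOrder α] (rs : List α) (a b : α) (ha : a ≤ b)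
    (h : ∀ y ∈ rs, y ≤ b) : rs.foldl max a ≤ b := by
  induction rs generalizing a with
  | nil => simpa
  | cons x rs ih =>
    exact ih (max a x) (max_le ha (h x List.mem_cons_self)) (fun y hy => h y (List.mem_cons_of_mem _ hy))

theorem pvFoldHeadMin (r0 : Int) (rs : List Int) (m : Int) (hm : m ∈ r0 :: rs)
    (hlb : ∀ y ∈ r0 :: rs, m ≤ y) : rs.foldl min r0 = m :=
  le_antisymm (pvFoldlMinLe rs r0 m hm)
    (pvFoldlMinGe rs r0 m (hlb r0 List.mem_cons_self) (fun y hy => hlb y (List.mem_cons_of_mem _ hy)))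

theorem pvFoldHeadMax (r0 : Int) (rs : List Int) (m : Int) (hm : m ∈ r0 :: rs)
    (hub : ∀ y ∈ r0 :: rs, y ≤ m) : rs.foldl max r0 = m :=
  le_antisymm
    (pvFoldlMaxGe rs r0 m (hub r0 List.mem_cons_self) (fun y hy => hub y (List.mem_cons_of_mem _ hy)))
    (pvFoldlMaxLe rs r0 m hm)

-- singleton substring facts
theorem pvSingletonPrefix (c : Char) (xs : List Char) : [c] <+: xs ↔ xs.head? = some c := by
  cases xs with
  | nil => simp
  | cons x xs => simp [List.cons_prefix_cons, eq_comm]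

theorem pvPrefixDrop (c : Char) (l : List Char) (j : Nat) :
    [c] <+: l.drop j ↔ l[j]? = some c := by
  rw [pvSingletonPrefix, List.head?_drop]

theorem pvSingletonInfix (c : Char) (l : List Char) : [c] <:+: l ↔ c ∈ l := by
  constructor
  · intro h; exact (List.singleton_sublist).1 h.sublist
  · intro h
    rcases List.append_of_mem h with ⟨s, t, rfl⟩
    exact ⟨s, t, by simp⟩

theorem pvIsInSingleton (c : Char) (l : List Char) :
    PySem.Chars.isIn [c] l = true ↔ c ∈ l := by
  rw [PySem.Chars.isIn_iff_infix, pvSingletonInfix]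

theorem pvStrHash : (String.toList "#") = ['#'] := by decide

theorem pvIsInStr (l : String) : PySem.Str.isIn "#" l = true ↔ '#' ∈ l.toList := by
  rw [PySem.Str.isIn_eq, pvStrHash, pvIsInSingleton]

-- '#'-positions of a line
def pvPos (l : List Char) (s : Int) : List Int :=
  ((PySem.List.enumerate l s).filter (fun p => p.2 == '#')).map (fun p => p.1)

theorem pvMemPos (l : List Char) (s x : Int) :
    x ∈ pvPos l s ↔ ∃ k : Nat, ∃ h : k < l.length, x = s + k ∧ l[k] = '#' := by
  simp only [pvPos, List.mem_map, List.mem_filter]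
  constructor
  · rintro ⟨p, ⟨hp, hc⟩, rfl⟩
    rcases (PySem.List.mem_enumerate_iff l s p).1 hp with ⟨k, hk, rfl⟩
    exact ⟨k, hk, rfl, by simpa using hc⟩
  · rintro ⟨k, hk, rfl, hc⟩
    exact ⟨(s + k, l[k]), ⟨(PySem.List.mem_enumerate_iff l s _).2 ⟨k, hk, rfl⟩, by simp [hc]⟩, rfl⟩

theorem pvPosNilIff (l : List Char) (s : Int) : pvPos l s = [] ↔ '#' ∉ l := by
  rw [List.eq_nil_iff_forall_not_mem, List.mem_iff_getElem]
  constructor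
  · rintro h ⟨k, hk, hc⟩
    exact h (s + k) ((pvMemPos l s _).2 ⟨k, hk, rfl, hc⟩)
  · rintro h x hx
    rcases (pvMemPos l s x).1 hx with ⟨k, hk, _, hc⟩
    exact h ⟨k, hk, hc⟩

-- find / rfind characterised as min / max of pvPos
theorem pvFindSpec (l : List Char) (h : '#' ∈ l) :
    PySem.Chars.find l ['#'] ∈ pvPos l 0 ∧ ∀ y ∈ pvPos l 0, PySem.Chars.find l ['#'] ≤ y := by
  have hnn : 0 ≤ PySem.Chars.find l ['#'] :=
    (PySem.Chars.find_nonneg_iff l ['#']).2 ((pvSingletonInfix '#' l).2 h)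
  obtain ⟨hpre, hmin⟩ := PySem.Chars.find_spec hnn
  set j := (PySem.Chars.find l ['#']).toNat with hj
  have hjf : PySem.Chars.find l ['#'] = (j : Int) := (Int.toNat_of_nonneg hnn).symm
  have hget : l[j]? = some '#' := (pvPrefixDrop '#' l j).1 hpre
  have hlt : j < l.length := (List.getElem?_eq_some_iff.1 hget).1
  have hgj : l[j] = '#' := (List.getElem?_eq_some_iff.1 hget).2
  constructor
  · exact (pvMemPos l 0 _).2 ⟨j, hlt, by omega, hgj⟩
  · intro y hy
    rcases (pvMemPos l 0 y).1 hy with ⟨k, hk, rfl, hck⟩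
    by_contra hcon
    push_neg at hcon
    have hklt : k < j := by omega
    exact hmin k hklt ((pvPrefixDrop '#' l k).2 (List.getElem?_eq_some_iff.2 ⟨hk, hck⟩))

theorem pvRfindGo (l : List Char) (n : Nat) :
    (PySem.Chars.rfind.go l ['#'] n = -1 ∧ ∀ j : Nat, j ≤ n → l[j]? ≠ some '#') ∨
    (∃ j : Nat, j ≤ n ∧ PySem.Chars.rfind.go l ['#'] n = (j : Int) ∧ l[j]? = some '#' ∧
      ∀ i : Nat, j < i → i ≤ n → l[i]? ≠ some '#') := by
  induction n with
  | zero =>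
    by_cases hp : l[0]? = some '#'
    · right
      refine ⟨0, le_refl 0, ?_, hp, fun i h1 h2 => by omega⟩
      have : (['#'].isPrefixOf l) = true :=
        List.isPrefixOf_iff_prefix.2 ((pvSingletonPrefix '#' l).2 (by rw [List.head?_eq_getElem?]; exact hp))
      simp [PySem.Chars.rfind.go, this]
    · left
      have : (['#'].isPrefixOf l) = true ↔ False := by
        simp only [List.isPrefixOf_iff_prefix, pvSingletonPrefix, iff_false]
        rw [List.head?_eq_getElem?]
        exact hp
      refine ⟨by simp [PySem.Chars.rfind.go, this], ?_⟩
      intro j hj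
      interval_cases j
      exact hp
  | succ n ih =>
    by_cases hp : l[n + 1]? = some '#'
    · right
      refine ⟨n + 1, le_refl _, ?_, hp, fun i h1 h2 => by omega⟩
      have : (['#'].isPrefixOf (l.drop (n + 1))) = true := by
        rw [List.isPrefixOf_iff_prefix, pvPrefixDrop]; exact hp
      simp [PySem.Chars.rfind.go, this]
    · have hgo : PySem.Chars.rfind.go l ['#'] (n + 1) = PySem.Chars.rfind.go l ['#'] n := by
        have : (['#'].isPrefixOf (l.drop (n + 1))) = false := by
          rw [Bool.eq_false_iff, Ne, List.isPrefixOf_iff_prefix, pvPrefixDrop]; exact hp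
        simp [PySem.Chars.rfind.go, this]
      rcases ih with ⟨h1, h2⟩ | ⟨j, hj, hgoj, hget, hmax⟩
      · left
        refine ⟨by rw [hgo]; exact h1, ?_⟩
        intro j hj
        rcases Nat.lt_or_ge j (n + 1) with hlt | hge
        · exact h2 j (by omega)
        · have : j = n + 1 := by omega
          subst this; exact hp
      · right
        refine ⟨j, by omega, by rw [hgo]; exact hgoj, hget, ?_⟩
        intro i h1 h2
        rcases Nat.lt_or_ge i (n + 1) with hlt | hge
        · exact hmax i h1 (by omega)
        · have : i = n + 1 := by omega
          subst this; exact hp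

theorem pvRfindSpec (l : List Char) (h : '#' ∈ l) :
    PySem.Chars.rfind l ['#'] ∈ pvPos l 0 ∧ ∀ y ∈ pvPos l 0, y ≤ PySem.Chars.rfind l ['#'] := by
  have hr : PySem.Chars.rfind l ['#'] = PySem.Chars.rfind.go l ['#'] l.length := rfl
  rcases pvRfindGo l l.length with ⟨h1, h2⟩ | ⟨j, hj, hgoj, hget, hmax⟩
  · exfalso
    rcases List.mem_iff_getElem.1 h with ⟨k, hk, hck⟩
    exact h2 k (by omega) (List.getElem?_eq_some_iff.2 ⟨hk, hck⟩)
  · have hlt : j < l.length := (List.getElem?_eq_some_iff.1 hget).1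
    have hgj : l[j] = '#' := (List.getElem?_eq_some_iff.1 hget).2
    constructor
    · rw [hr, hgoj]
      exact (pvMemPos l 0 _).2 ⟨j, hlt, by omega, hgj⟩
    · intro y hy
      rcases (pvMemPos l 0 y).1 hy with ⟨k, hk, rfl, hck⟩
      rw [hr, hgoj]
      by_contra hcon
      push_neg at hcon
      have hklt : j < k := by omega
      exact hmax k hklt (by omega) (List.getElem?_eq_some_iff.2 ⟨hk, hck⟩)

-- the whole-plan position lists
def pvAllR (ls : List String) (s : Int) : List Int :=
  (PySem.List.enumerate ls s).flatMap (fun p => (pvPos p.2.toList 0).map (fun _ => p.1))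
def pvAllC (ls : List String) (s : Int) : List Int :=
  (PySem.List.enumerate ls s).flatMap (fun p => pvPos p.2.toList 0)

theorem pvAllR_cons (x : String) (ls : List String) (s : Int) :
    pvAllR (x :: ls) s = (pvPos x.toList 0).map (fun _ => s) ++ pvAllR ls (s + 1) := by
  simp [pvAllR, PySem.List.enumerate_cons]

theorem pvAllC_cons (x : String) (ls : List String) (s : Int) :
    pvAllC (x :: ls) s = pvPos x.toList 0 ++ pvAllC ls (s + 1) := by
  simp [pvAllC, PySem.List.enumerate_cons]

theorem pvFoldlMinEq (xs : List Int) (a m : Int) (hm : m ∈ xs) (hle : ∀ y ∈ xs, m ≤ y) :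
    xs.foldl min a = min a m := by
  refine le_antisymm (le_min (pvFoldlMinLeInit _ _) (pvFoldlMinLeMem _ _ _ hm)) ?_
  exact pvFoldlMinGe xs a (min a m) (min_le_left _ _) (fun y hy => le_trans (min_le_right _ _) (hle y hy))

theorem pvFoldlMaxEq (xs : List Int) (a m : Int) (hm : m ∈ xs) (hle : ∀ y ∈ xs, y ≤ m) :
    xs.foldl max a = max a m := by
  refine le_antisymm ?_ (max_le (pvFoldlMaxLeInit _ _) (pvFoldlMaxLeMem _ _ _ hm))
  exact pvFoldlMaxGe xs a (max a m) (le_max_left _ _) (fun y hy => le_trans (hle y hy) (le_max_right _ _))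

theorem pvAFoldEq (ls : List String) (s : Int) (rows cols : List Int) :
    (PySem.List.enumerate ls s).foldl pvAStep
        (rows.foldl min 1000, rows.foldl max (-1), cols.foldl min 1000, cols.foldl max (-1)) =
      ((rows ++ pvAllR ls s).foldl min 1000, (rows ++ pvAllR ls s).foldl max (-1),
       (cols ++ pvAllC ls s).foldl min 1000, (cols ++ pvAllC ls s).foldl max (-1)) := by
  induction ls generalizing s rows cols with
  | nil => simp [pvAllR, pvAllC, PySem.List.enumerate_nil]
  | cons l ls ih =>
    rw [PySem.List.enumerate_cons, List.foldl_cons, pvAllR_cons, pvAllC_cons]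
    by_cases hin : PySem.Str.isIn "#" l = true
    · have hmem : '#' ∈ l.toList := (pvIsInStr l).1 hin
      have hpos : pvPos l.toList 0 ≠ [] := by rw [Ne, pvPosNilIff]; simpa using hmem
      have hfind := pvFindSpec l.toList hmem
      have hrfind := pvRfindSpec l.toList hmem
      have hstep : pvAStep (rows.foldl min 1000, rows.foldl max (-1),
          cols.foldl min 1000, cols.foldl max (-1)) (s, l) =
          ((rows ++ (pvPos l.toList 0).map (fun _ => s)).foldl min 1000,
           (rows ++ (pvPos l.toList 0).map (fun _ => s)).foldl max (-1),
           (cols ++ pvPos l.toList 0).foldl min 1000,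
           (cols ++ pvPos l.toList 0).foldl max (-1)) := by
        simp only [pvAStep, hin, if_pos]
        rcases List.exists_mem_of_ne_nil _ hpos with ⟨y, hy⟩
        have hsmem : s ∈ (pvPos l.toList 0).map (fun _ => s) := List.mem_map.2 ⟨y, hy, rfl⟩
        have hfs : PySem.Str.find l "#" = PySem.Chars.find l.toList ['#'] := by
          rw [PySem.Str.find_eq]; rfl
        have hrs : PySem.Str.rfind l "#" = PySem.Chars.rfind l.toList ['#'] := by
          rw [PySem.Str.rfind_eq]; rfl
        rw [List.foldl_append, List.foldl_append, List.foldl_append, List.foldl_append]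
        rw [pvFoldlMinEq _ _ s hsmem (by intro y' hy'; rcases List.mem_map.1 hy' with ⟨_, _, rfl⟩; exact le_rfl)]
        rw [pvFoldlMaxEq _ _ s hsmem (by intro y' hy'; rcases List.mem_map.1 hy' with ⟨_, _, rfl⟩; exact le_rfl)]
        rw [pvFoldlMinEq _ _ _ hfind.1 hfind.2, pvFoldlMaxEq _ _ _ hrfind.1 hrfind.2]
        rw [hfs, hrs]
      rw [hstep, ih (s + 1) (rows ++ (pvPos l.toList 0).map (fun _ => s)) (cols ++ pvPos l.toList 0)]
      simp [List.append_assoc]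
    · have hmem : '#' ∉ l.toList := fun hc => hin ((pvIsInStr l).2 hc)
      have hpos : pvPos l.toList 0 = [] := (pvPosNilIff _ _).2 hmem
      have hstep : pvAStep (rows.foldl min 1000, rows.foldl max (-1),
          cols.foldl min 1000, cols.foldl max (-1)) (s, l) =
          (rows.foldl min 1000, rows.foldl max (-1), cols.foldl min 1000, cols.foldl max (-1)) := by
        simp [pvAStep, hin]
        intro h
        exact absurd ((pvIsInStr l).1 (by simpa using h)) hmem
      rw [hstep, ih (s + 1) rows cols, hpos]
      simp

-- membership characterisations of the row / column index lists
theorem pvAllRMemIff (ls : List String) (s : Int) (x : Int) :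
    x ∈ pvAllR ls s ↔ ∃ k : Nat, ∃ hk : k < ls.length, x = s + k ∧ '#' ∈ ls[k].toList := by
  induction ls generalizing s with
  | nil => simp [pvAllR, PySem.List.enumerate_nil]
  | cons l ls ih =>
    rw [pvAllR_cons, List.mem_append]
    constructor
    · rintro (h | h)
      · rcases List.mem_map.1 h with ⟨y, hy, rfl⟩
        have hml : '#' ∈ l.toList := by
          rcases (pvMemPos l.toList 0 y).1 hy with ⟨k, hk, _, hc⟩
          exact List.mem_iff_getElem.2 ⟨k, hk, hc⟩
        exact ⟨0, by simp, by simp, by simpa⟩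
      · rcases (ih (s + 1)).1 h with ⟨k, hk, rfl, hc⟩
        refine ⟨k + 1, by simpa using hk, by push_cast; ring, by simpa using hc⟩
    · rintro ⟨k, hk, rfl, hc⟩
      cases k with
      | zero =>
        left
        have hml : '#' ∈ l.toList := by simpa using hc
        have hne : pvPos l.toList 0 ≠ [] := by rw [Ne, pvPosNilIff]; simpa
        rcases List.exists_mem_of_ne_nil _ hne with ⟨y, hy⟩
        exact List.mem_map.2 ⟨y, hy, by simp⟩
      | succ k =>
        right
        refine (ih (s + 1)).2 ⟨k, by simpa using hk, by push_cast; ring, by simpa using hc⟩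

theorem pvAllCMemIff (ls : List String) (s : Int) (x : Int) :
    x ∈ pvAllC ls s ↔ ∃ l ∈ ls, x ∈ pvPos l.toList 0 := by
  induction ls generalizing s with
  | nil => simp [pvAllC, PySem.List.enumerate_nil]
  | cons l ls ih =>
    rw [pvAllC_cons, List.mem_append, ih (s + 1)]
    simp [List.exists_mem_cons_iff]

-- trimming lemmas
theorem pvTrimF_cons (x : String) (xs : List String) :
    pvTrimF (x :: xs) = if PySem.Str.isIn "#" x then x :: xs else pvTrimF xs := rfl

theorem pvTrimFSubset (xs : List String) : ∀ l ∈ pvTrimF xs, l ∈ xs := by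
  induction xs with
  | nil => simp [pvTrimF]
  | cons x xs ih =>
    intro l hl
    rw [pvTrimF_cons] at hl
    by_cases hx : PySem.Str.isIn "#" x = true
    · rw [if_pos hx] at hl; exact hl
    · rw [if_neg hx] at hl; exact List.mem_cons_of_mem _ (ih l hl)

theorem pvTrimSubset (xs : List String) : ∀ l ∈ pvTrim xs, l ∈ xs := by
  intro l hl
  rw [pvTrim, List.mem_reverse] at hl
  have := pvTrimFSubset _ _ hl
  rw [List.mem_reverse] at this
  exact pvTrimFSubset _ _ this

theorem pvMarkedMemTrimF (xs : List String) (l : String) (hl : l ∈ xs) (hm : '#' ∈ l.toList) :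
    l ∈ pvTrimF xs := by
  induction xs with
  | nil => simp at hl
  | cons x xs ih =>
    rw [pvTrimF_cons]
    by_cases hx : PySem.Str.isIn "#" x = true
    · rw [if_pos hx]; exact hl
    · rw [if_neg hx]
      rcases List.mem_cons.1 hl with h | h
      · exact absurd ((pvIsInStr x).2 (h ▸ hm)) hx
      · exact ih h

theorem pvMarkedMemTrim (xs : List String) (l : String) (hl : l ∈ xs) (hm : '#' ∈ l.toList) :
    l ∈ pvTrim xs := by
  rw [pvTrim, List.mem_reverse]
  exact pvMarkedMemTrimF _ _ (by rw [List.mem_reverse]; exact pvMarkedMemTrimF _ _ hl hm) hm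

theorem pvTrimFNil (xs : List String) (h : ∀ l ∈ xs, '#' ∉ l.toList) : pvTrimF xs = [] := by
  induction xs with
  | nil => rfl
  | cons x xs ih =>
    have hx : ¬ PySem.Str.isIn "#" x = true :=
      fun hc => h x List.mem_cons_self ((pvIsInStr x).1 hc)
    rw [pvTrimF_cons, if_neg hx]
    exact ih (fun l hl => h l (List.mem_cons_of_mem _ hl))

theorem pvTrimNil (xs : List String) (h : ∀ l ∈ xs, '#' ∉ l.toList) : pvTrim xs = [] := by
  rw [pvTrim, pvTrimFNil xs h]
  rfl

theorem pvTrimFEqDropWhile (xs : List String) :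
    pvTrimF xs = xs.dropWhile (fun l => ! PySem.Str.isIn "#" l) := by
  induction xs with
  | nil => rfl
  | cons x xs ih =>
    rw [pvTrimF_cons, List.dropWhile_cons]
    by_cases hx : PySem.Str.isIn "#" x = true
    · rw [if_pos hx, if_neg (by show ¬ (! PySem.Str.isIn "#" x) = true; rw [hx]; decide)]
    · have hx' : PySem.Str.isIn "#" x = false := Bool.eq_false_iff.2 hx
      rw [if_neg hx, if_pos (by show (! PySem.Str.isIn "#" x) = true; rw [hx']; decide), ih]

-- the crop decomposition: after trimming, xs = unmarked prefix ++ trimmed ++ unmarked suffix,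
-- and the trimmed part starts and ends with a marked line
theorem pvTrimDecomp (xs : List String) (h : ∃ l ∈ xs, '#' ∈ l.toList) :
    ∃ p z q : List String, xs = p ++ z ++ q ∧ pvTrim xs = z ∧
      (∀ l ∈ p, '#' ∉ l.toList) ∧ (∀ l ∈ q, '#' ∉ l.toList) ∧
      ∃ hz : z ≠ [], '#' ∈ (z.head hz).toList ∧ '#' ∈ (z.getLast hz).toList := by
  obtain ⟨l0, hl0, hm0⟩ := h
  have hy_ne : xs.dropWhile (fun l => ! PySem.Str.isIn "#" l) ≠ [] := by
    rw [Ne, List.dropWhile_eq_nil_iff]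
    push_neg
    refine ⟨l0, hl0, ?_⟩
    have h1 : PySem.Str.isIn "#" l0 = true := (pvIsInStr l0).2 hm0
    show ¬ (! PySem.Str.isIn "#" l0) = true
    rw [h1]; decide
  have hyhead : '#' ∈ ((xs.dropWhile (fun l => ! PySem.Str.isIn "#" l)).head hy_ne).toList := by
    have h0 := List.head_dropWhile_not (fun l => ! PySem.Str.isIn "#" l) hy_ne
    have h1 : (! PySem.Str.isIn "#"
        ((xs.dropWhile (fun l => ! PySem.Str.isIn "#" l)).head hy_ne)) = false := h0
    exact (pvIsInStr _).1 (by simpa using h1)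
  set y := xs.dropWhile (fun l => ! PySem.Str.isIn "#" l) with hydef
  have hw_ne : y.reverse.dropWhile (fun l => ! PySem.Str.isIn "#" l) ≠ [] := by
    rw [Ne, List.dropWhile_eq_nil_iff]
    push_neg
    refine ⟨y.head hy_ne, by rw [List.mem_reverse]; exact List.head_mem hy_ne, ?_⟩
    have h1 : PySem.Str.isIn "#" (y.head hy_ne) = true := (pvIsInStr _).2 hyhead
    show ¬ (! PySem.Str.isIn "#" (y.head hy_ne)) = true
    rw [h1]; decide
  have hwhead : '#' ∈ ((y.reverse.dropWhile (fun l => ! PySem.Str.isIn "#" l)).head hw_ne).toList := by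
    have h0 := List.head_dropWhile_not (fun l => ! PySem.Str.isIn "#" l) hw_ne
    have h1 : (! PySem.Str.isIn "#"
        ((y.reverse.dropWhile (fun l => ! PySem.Str.isIn "#" l)).head hw_ne)) = false := h0
    exact (pvIsInStr _).1 (by simpa using h1)
  set w := y.reverse.dropWhile (fun l => ! PySem.Str.isIn "#" l) with hwdef
  have hzne : w.reverse ≠ [] := by simpa using hw_ne
  have h2 : y.reverse.takeWhile (fun l => ! PySem.Str.isIn "#" l) ++ w = y.reverse := by
    rw [hwdef]; exact List.takeWhile_append_dropWhile
  have h3 : y = w.reverse ++ (y.reverse.takeWhile (fun l => ! PySem.Str.isIn "#" l)).reverse := by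
    have := congrArg List.reverse h2
    simpa using this.symm
  refine ⟨xs.takeWhile (fun l => ! PySem.Str.isIn "#" l), w.reverse,
    (y.reverse.takeWhile (fun l => ! PySem.Str.isIn "#" l)).reverse, ?_, ?_, ?_, ?_, ?_⟩
  · have h1 : xs.takeWhile (fun l => ! PySem.Str.isIn "#" l) ++ y = xs := by
      rw [hydef]; exact List.takeWhile_append_dropWhile
    rw [List.append_assoc, ← h3, h1]
  · rw [pvTrim, pvTrimFEqDropWhile, pvTrimFEqDropWhile, ← hydef, ← hwdef]
  · intro l hl
    have hdl := List.mem_takeWhile_imp hl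
    intro hc
    have h1 : PySem.Str.isIn "#" l = true := (pvIsInStr l).2 hc
    rw [h1] at hdl
    exact absurd hdl (by decide)
  · intro l hl
    rw [List.mem_reverse] at hl
    have hdl := List.mem_takeWhile_imp hl
    intro hc
    have h1 : PySem.Str.isIn "#" l = true := (pvIsInStr l).2 hc
    rw [h1] at hdl
    exact absurd hdl (by decide)
  · refine ⟨hzne, ?_, ?_⟩
    · obtain ⟨a, as, hwr⟩ := List.exists_cons_of_ne_nil hzne
      have hyh : y.head? = some a := by rw [h3, hwr]; rfl
      have hzh : (w.reverse).head? = some a := by rw [hwr]; rfl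
      have h4 := List.head?_eq_some_head hy_ne
      have e1 : y.head hy_ne = a := Option.some.inj (h4.symm.trans hyh)
      have h5 := List.head?_eq_some_head hzne
      have e2 : (w.reverse).head hzne = a := Option.some.inj (h5.symm.trans hzh)
      rw [e2, ← e1]
      exact hyhead
    · rw [List.getLast_reverse]
      exact hwhead

-- index facts from the decomposition
theorem pvDecompIdx (p z q : List String) (hz : z ≠ [])
    (hp : ∀ l ∈ p, '#' ∉ l.toList) (hq : ∀ l ∈ q, '#' ∉ l.toList)
    (hh : '#' ∈ (z.head hz).toList) (hl : '#' ∈ (z.getLast hz).toList) :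
    (∃ h1 : p.length < (p ++ z ++ q).length, '#' ∈ ((p ++ z ++ q)[p.length]).toList) ∧
    (∃ h2 : p.length + (z.length - 1) < (p ++ z ++ q).length,
        '#' ∈ ((p ++ z ++ q)[p.length + (z.length - 1)]).toList) ∧
    (∀ k, ∀ hk : k < (p ++ z ++ q).length, '#' ∈ ((p ++ z ++ q)[k]).toList →
        p.length ≤ k ∧ k ≤ p.length + (z.length - 1)) := by
  have hzlen : 0 < z.length := List.length_pos_iff.2 hz
  have hlen : (p ++ z ++ q).length = p.length + z.length + q.length := by
    simp [Nat.add_assoc]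
  have hb1 : p.length < (p ++ z ++ q).length := by omega
  have hb2 : p.length + (z.length - 1) < (p ++ z ++ q).length := by omega
  have hq1 : (p ++ z ++ q)[p.length]? = some (z[0]'hzlen) := by
    rw [List.append_assoc, List.getElem?_append_right (le_refl p.length), Nat.sub_self,
      List.getElem?_append_left hzlen, List.getElem?_eq_getElem hzlen]
  have hg1 : (p ++ z ++ q)[p.length]'hb1 = z[0]'hzlen := by
    have h4 := List.getElem?_eq_getElem hb1
    exact (Option.some.inj (hq1.symm.trans h4)).symm
  have hq2 : (p ++ z ++ q)[p.length + (z.length - 1)]? = some (z[z.length - 1]'(by omega)) := by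
    rw [List.append_assoc,
      List.getElem?_append_right (by omega : p.length ≤ p.length + (z.length - 1))]
    have e : p.length + (z.length - 1) - p.length = z.length - 1 := by omega
    rw [e, List.getElem?_append_left (by omega), List.getElem?_eq_getElem (by omega)]
  have hg2 : (p ++ z ++ q)[p.length + (z.length - 1)]'hb2 = z[z.length - 1]'(by omega) := by
    have h4 := List.getElem?_eq_getElem hb2
    exact (Option.some.inj (hq2.symm.trans h4)).symm
  refine ⟨⟨hb1, ?_⟩, ⟨hb2, ?_⟩, ?_⟩
  · rw [hg1, show (z[0]'hzlen) = z.head hz from (List.head_eq_getElem hz).symm]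
    exact hh
  · rw [hg2, show (z[z.length - 1]'(by omega)) = z.getLast hz from (List.getLast_eq_getElem hz).symm]
    exact hl
  · intro k hk hmk
    constructor
    · by_contra hcon
      push_neg at hcon
      have hqk : (p ++ z ++ q)[k]? = some (p[k]'hcon) := by
        rw [List.append_assoc, List.getElem?_append_left hcon, List.getElem?_eq_getElem hcon]
      have h4 := List.getElem?_eq_getElem hk
      have heq : (p ++ z ++ q)[k]'hk = p[k]'hcon := (Option.some.inj (hqk.symm.trans h4)).symm
      exact hp _ (List.getElem_mem hcon) (heq ▸ hmk)
    · by_contra hcon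
      push_neg at hcon
      have hklen : k - (p.length + z.length) < q.length := by omega
      have hqk : (p ++ z ++ q)[k]? = some (q[k - (p.length + z.length)]'hklen) := by
        rw [List.append_assoc, List.getElem?_append_right (by omega : p.length ≤ k),
          List.getElem?_append_right (by omega : z.length ≤ k - p.length)]
        have e : k - p.length - z.length = k - (p.length + z.length) := by omega
        rw [e, List.getElem?_eq_getElem hklen]
      have h4 := List.getElem?_eq_getElem hk
      have heq : (p ++ z ++ q)[k]'hk = q[k - (p.length + z.length)]'hklen :=
        (Option.some.inj (hqk.symm.trans h4)).symm
      exact hq _ (List.getElem_mem hklen) (heq ▸ hmk)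

-- max - min + 1 of a marked-index list equals the trimmed length
theorem pvCropLen (xs : List String) (S : List Int) (r0 : Int) (rs : List Int)
    (hiff : ∀ x, x ∈ S ↔ ∃ k : Nat, ∃ hk : k < xs.length, x = (k : Int) ∧ '#' ∈ (xs[k]).toList)
    (hS : S = r0 :: rs) :
    rs.foldl max r0 - rs.foldl min r0 + 1 = ((pvTrim xs).length : Int) := by
  have hex : ∃ l ∈ xs, '#' ∈ l.toList := by
    have hr0 : r0 ∈ S := hS ▸ List.mem_cons_self
    rcases (hiff r0).1 hr0 with ⟨k, hk, _, hm⟩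
    exact ⟨xs[k], List.getElem_mem hk, hm⟩
  obtain ⟨p, z, q, hxs, hT, hpU, hqU, hz, hzh, hzl⟩ := pvTrimDecomp xs hex
  subst hxs
  obtain ⟨⟨h1, hm1⟩, ⟨h2, hm2⟩, hbound⟩ := pvDecompIdx p z q hz hpU hqU hzh hzl
  have hzlen : 0 < z.length := List.length_pos_iff.2 hz
  have hminS : rs.foldl min r0 = (p.length : Int) := by
    apply pvFoldHeadMin
    · rw [← hS]
      exact (hiff _).2 ⟨p.length, h1, rfl, hm1⟩
    · intro y hy
      rcases (hiff y).1 (hS ▸ hy) with ⟨k, hk, rfl, hm⟩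
      exact_mod_cast (hbound k hk hm).1
  have hmaxS : rs.foldl max r0 = ((p.length + (z.length - 1) : Nat) : Int) := by
    apply pvFoldHeadMax
    · rw [← hS]
      exact (hiff _).2 ⟨p.length + (z.length - 1), h2, rfl, hm2⟩
    · intro y hy
      rcases (hiff y).1 (hS ▸ hy) with ⟨k, hk, rfl, hm⟩
      exact_mod_cast (hbound k hk hm).2
  rw [hminS, hmaxS, hT]
  omega

-- length fold = fold of the mapped lengths
theorem pvFoldLenEq (T : List String) (a : Nat) :
    T.foldl (fun acc l => max acc l.toList.length) a =
      (T.map (fun l => l.toList.length)).foldl max a := by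
  induction T generalizing a with
  | nil => rfl
  | cons x T ih =>
    simp only [List.map_cons, List.foldl_cons]
    exact ih _

-- columns: membership in pvAllC as markedness of the transposed column strings
theorem pvColMarkedIff (T : List String) (j : Nat) :
    '#' ∈ (String.ofList (T.map (fun l => l.toList.getD j ' '))).toList ↔
      ∃ l ∈ T, ∃ hj : j < l.toList.length, l.toList[j] = '#' := by
  rw [String.toList_ofList, List.mem_map]
  constructor
  · rintro ⟨l, hl, hval⟩
    by_cases hj : j < l.toList.length
    · rw [List.getD_eq_getElem l.toList ' ' hj] at hval
      exact ⟨l, hl, hj, hval⟩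
    · rw [List.getD_eq_default l.toList ' ' (by omega)] at hval
      exact absurd hval (by decide)
  · rintro ⟨l, hl, hj, hval⟩
    exact ⟨l, hl, by rw [List.getD_eq_getElem l.toList ' ' hj]; exact hval⟩

theorem pvColMemIff (L : List String) (x : Int) :
    x ∈ pvAllC L 0 ↔
      ∃ k : Nat, ∃ hk : k < ((List.range ((pvTrim L).foldl (fun acc l => max acc l.toList.length) 0)).map
          (fun j => String.ofList ((pvTrim L).map (fun l => l.toList.getD j ' ')))).length,
        x = (k : Int) ∧
        '#' ∈ (((List.range ((pvTrim L).foldl (fun acc l => max acc l.toList.length) 0)).map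
          (fun j => String.ofList ((pvTrim L).map (fun l => l.toList.getD j ' '))))[k]).toList := by
  set T := pvTrim L with hTdef
  set w := T.foldl (fun acc l => max acc l.toList.length) 0 with hwdef
  have hwle : ∀ l ∈ T, l.toList.length ≤ w := by
    intro l hl
    rw [hwdef, pvFoldLenEq]
    exact pvFoldlMaxLeMem _ _ _ (List.mem_map.2 ⟨l, hl, rfl⟩)
  have hXval : ∀ (k : Nat) (hk2 : k < ((List.range w).map
        (fun j => String.ofList (T.map (fun l => l.toList.getD j ' ')))).length),
      ((List.range w).map (fun j => String.ofList (T.map (fun l => l.toList.getD j ' '))))[k]'hk2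
        = String.ofList (T.map (fun l => l.toList.getD k ' ')) := by
    intro k hk2
    simp
  constructor
  · intro hx
    rcases (pvAllCMemIff L 0 x).1 hx with ⟨l, hl, hpos⟩
    rcases (pvMemPos l.toList 0 x).1 hpos with ⟨k, hk, rfl, hc⟩
    have hml : '#' ∈ l.toList := List.mem_iff_getElem.2 ⟨k, hk, hc⟩
    have hlT : l ∈ T := pvMarkedMemTrim L l hl hml
    have hkw : k < w := lt_of_lt_of_le hk (hwle l hlT)
    have hkX : k < ((List.range w).map
        (fun j => String.ofList (T.map (fun l => l.toList.getD j ' ')))).length := by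
      simpa using hkw
    refine ⟨k, hkX, by omega, ?_⟩
    rw [hXval k hkX, pvColMarkedIff]
    exact ⟨l, hlT, hk, hc⟩
  · rintro ⟨k, hk, rfl, hm⟩
    rw [hXval k hk, pvColMarkedIff] at hm
    rcases hm with ⟨l, hlT, hj, hc⟩
    refine (pvAllCMemIff L 0 _).2 ⟨l, pvTrimSubset L l hlT, ?_⟩
    exact (pvMemPos l.toList 0 _).2 ⟨k, hj, by omega, hc⟩

-- splitlines plumbing
theorem pvGoNilNil (isB : Char → Bool) (acc : List (List Char)) :
    PySem.Chars.splitlines.go isB [] [] acc = acc.reverse := by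
  rw [PySem.Chars.splitlines.go.eq_def]
  simp

theorem pvGoNilCons (isB : Char → Bool) (cur : List Char) (acc : List (List Char))
    (h : ¬ cur.isEmpty = true) :
    PySem.Chars.splitlines.go isB [] cur acc = (cur.reverse :: acc).reverse := by
  rw [PySem.Chars.splitlines.go.eq_def]
  simp [h]

theorem pvGoCRLF (isB : Char → Bool) (rest cur : List Char) (acc : List (List Char)) :
    PySem.Chars.splitlines.go isB ('\x0d' :: '\n' :: rest) cur acc =
      PySem.Chars.splitlines.go isB rest [] (cur.reverse :: acc) := by
  rw [PySem.Chars.splitlines.go.eq_def]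
  split
  · rename_i heq; exact absurd heq (by simp)
  · rename_i r' heq
    injection heq with h1 h2
    injection h2 with h3 h4
    rw [h4]
  · rename_i c' rest' hne' heq
    injection heq with h1 h2
    exact absurd (hne' rest h1.symm h2.symm) not_false

theorem pvGoBreak (isB : Char → Bool) (c : Char) (rest cur : List Char) (acc : List (List Char))
    (hne : ∀ (rest_1 : List Char), c = '\x0d' → rest = '\n' :: rest_1 → False)
    (hc : isB c = true) :
    PySem.Chars.splitlines.go isB (c :: rest) cur acc =
      PySem.Chars.splitlines.go isB rest [] (cur.reverse :: acc) := by
  rw [PySem.Chars.splitlines.go.eq_def]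
  split
  · rename_i heq; exact absurd heq (by simp)
  · rename_i r' heq
    injection heq with h1 h2
    exact absurd (hne r' h1 h2) not_false
  · rename_i c' rest' hne' heq
    injection heq with h1 h2
    subst h1; subst h2
    rw [if_pos hc]

theorem pvGoChar (isB : Char → Bool) (c : Char) (rest cur : List Char) (acc : List (List Char))
    (hne : ∀ (rest_1 : List Char), c = '\x0d' → rest = '\n' :: rest_1 → False)
    (hc : ¬ isB c = true) :
    PySem.Chars.splitlines.go isB (c :: rest) cur acc =
      PySem.Chars.splitlines.go isB rest (c :: cur) acc := by
  rw [PySem.Chars.splitlines.go.eq_def]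
  split
  · rename_i heq; exact absurd heq (by simp)
  · rename_i r' heq
    injection heq with h1 h2
    exact absurd (hne r' h1 h2) not_false
  · rename_i c' rest' hne' heq
    injection heq with h1 h2
    subst h1; subst h2
    rw [if_neg hc]

theorem pvSplitGoMem (isB : Char → Bool) (hB : isB '#' = false)
    (s cur : List Char) (acc : List (List Char)) :
    (∃ l ∈ PySem.Chars.splitlines.go isB s cur acc, '#' ∈ l) ↔
      (∃ l ∈ acc, '#' ∈ l) ∨ '#' ∈ cur ∨ '#' ∈ s := by
  induction s, cur, acc using PySem.Chars.splitlines.go.induct isB with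
  | case1 cur acc hcur =>
    rw [List.isEmpty_iff] at hcur
    subst hcur
    rw [pvGoNilNil]
    simp
  | case2 cur acc hcur =>
    rw [pvGoNilCons isB cur acc hcur]
    simp only [List.mem_reverse, List.exists_mem_cons_iff, List.mem_cons, List.not_mem_nil,
      or_false, false_or]
    aesop
  | case3 rest cur acc ih =>
    rw [pvGoCRLF, ih]
    have h1 : ¬ (('#' : Char) = '\x0d') := by decide
    have h2 : ¬ (('#' : Char) = '\n') := by decide
    simp only [List.mem_reverse, List.exists_mem_cons_iff, List.mem_cons, List.not_mem_nil,
      or_false, false_or]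
    aesop
  | case4 c rest cur acc hne hc ih =>
    rw [pvGoBreak isB c rest cur acc hne hc, ih]
    have hcn : ¬ (('#' : Char) = c) := by
      intro h; rw [← h] at hc; rw [hB] at hc; exact absurd hc (by simp)
    simp only [List.mem_reverse, List.exists_mem_cons_iff, List.mem_cons, List.not_mem_nil,
      or_false, false_or]
    aesop
  | case5 c rest cur acc hne hc ih =>
    rw [pvGoChar isB c rest cur acc hne hc, ih]
    simp only [List.mem_cons]
    aesop

theorem pvSplitMem (s : List Char) :
    (∃ l ∈ PySem.Chars.splitlines s, '#' ∈ l) ↔ '#' ∈ s := by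
  unfold PySem.Chars.splitlines
  rw [pvSplitGoMem _ (by decide) s [] []]
  simp

theorem pvMapToList (plan : String) :
    (PySem.Str.splitlines (PySem.Str.slice plan (some 1) none)).map String.toList =
      PySem.Chars.splitlines (plan.toList.drop 1) := by
  rw [PySem.Str.splitlines_map_toList]
  congr 1
  rw [PySem.Str.toList_slice, PySem.Chars.slice_eq_listSlice, PySem.List.slice_from_one,
    List.drop_one]

-- ===== VERDICT =====
set_option maxHeartbeats 6400000 in
theorem house_spec : Claim_unchanged_house := by
  intro plan _ hD
  show house plan = house_alt plan
  have hmap := pvMapToList plan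
  have hexIff : (∃ l ∈ PySem.Chars.splitlines (plan.toList.drop 1), '#' ∈ l) ↔
      (∃ l ∈ PySem.Str.splitlines (PySem.Str.slice plan (some 1) none), '#' ∈ l.toList) := by
    rw [← hmap]
    constructor
    · rintro ⟨l, hl, hml⟩
      rcases List.mem_map.1 hl with ⟨L', hL', rfl⟩
      exact ⟨L', hL', hml⟩
    · rintro ⟨L', hL', hml⟩
      exact ⟨L'.toList, List.mem_map.2 ⟨L', hL', rfl⟩, hml⟩
  set L := PySem.Str.splitlines (PySem.Str.slice plan (some 1) none) with hLdef
  have hBval : house_alt plan =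
      ((pvTrim L).length : Int) *
      ((pvTrim ((List.range ((pvTrim L).foldl (fun acc l => max acc l.toList.length) 0)).map
        (fun j => String.ofList ((pvTrim L).map (fun l => l.toList.getD j ' '))))).length : Int) := rfl
  by_cases hin : PySem.Str.isIn "#" plan = true
  · -- there is a '#' somewhere in plan
    have hplan : '#' ∈ plan.toList := (pvIsInStr plan).1 hin
    rw [D_house] at hD
    push_neg at hD
    obtain ⟨hD1, hD2⟩ := hD
    have htl : '#' ∈ plan.toList.drop 1 := hD1 hplan
    have hex_cls : ∃ l ∈ PySem.Chars.splitlines (plan.toList.drop 1), '#' ∈ l :=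
      (pvSplitMem _).2 htl
    obtain ⟨hc1', hc2'⟩ := hD2 htl
    have hex : ∃ l ∈ L, '#' ∈ l.toList := hexIff.1 hex_cls
    have hc1 : ∃ l ∈ L.take 1001, '#' ∈ l.toList := by
      obtain ⟨l, hl, hml⟩ := hc1'
      rw [← hmap, ← List.map_take] at hl
      rcases List.mem_map.1 hl with ⟨L', hL', rfl⟩
      exact ⟨L', hL', hml⟩
    have hc2 : ∃ l ∈ L, '#' ∈ l.toList.take 1001 := by
      obtain ⟨l, hl, hml⟩ := hc2'
      rw [← hmap] at hl
      rcases List.mem_map.1 hl with ⟨L', hL', rfl⟩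
      exact ⟨L', hL', hml⟩
    set R := pvAllR L 0 with hRdef
    set C := pvAllC L 0 with hCdef
    have hRiff : ∀ x, x ∈ R ↔ ∃ k : Nat, ∃ hk : k < L.length, x = (k : Int) ∧ '#' ∈ (L[k]).toList := by
      intro x
      rw [hRdef, pvAllRMemIff]
      constructor
      · rintro ⟨k, hk, rfl, hm⟩; exact ⟨k, hk, by omega, hm⟩
      · rintro ⟨k, hk, rfl, hm⟩; exact ⟨k, hk, by omega, hm⟩
    have hRne : R ≠ [] := by
      obtain ⟨l, hl, hml⟩ := hex
      rcases List.mem_iff_getElem.1 hl with ⟨k, hk, rfl⟩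
      exact List.ne_nil_of_mem ((hRiff (k : Int)).2 ⟨k, hk, rfl, hml⟩)
    have hCne : C ≠ [] := by
      obtain ⟨l, hl, hml⟩ := hex
      rcases List.mem_iff_getElem.1 hml with ⟨j, hj, hcj⟩
      refine List.ne_nil_of_mem ((pvAllCMemIff L 0 (j : Int)).2 ⟨l, hl, ?_⟩)
      exact (pvMemPos l.toList 0 _).2 ⟨j, hj, by omega, hcj⟩
    obtain ⟨r0, rs, hR⟩ := List.exists_cons_of_ne_nil hRne
    obtain ⟨c0, cs, hC⟩ := List.exists_cons_of_ne_nil hCne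
    -- evaluate port A
    have hA : house plan = (R.foldl max (-1) - R.foldl min 1000 + 1) *
        (C.foldl max (-1) - C.foldl min 1000 + 1) := by
      rw [house, if_neg (by intro hf; rw [hin] at hf; exact absurd hf (by decide))]
      have hinit : ((1000 : Int), (-1 : Int), (1000 : Int), (-1 : Int)) =
          (([] : List Int).foldl min 1000, ([] : List Int).foldl max (-1),
           ([] : List Int).foldl min 1000, ([] : List Int).foldl max (-1)) := rfl
      rw [hinit, pvAFoldEq L 0 [] []]
      simp only [pvAFinish, List.nil_append, ← hRdef, ← hCdef]
    -- bounds on the head elements and the ≤ 1000 facts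
    have hr0mem : r0 ∈ R := by rw [hR]; exact List.mem_cons_self
    have hr0 : 0 ≤ r0 := by
      rcases (hRiff r0).1 hr0mem with ⟨k, _, rfl, _⟩
      exact Int.natCast_nonneg k
    have hc0mem : c0 ∈ C := by rw [hC]; exact List.mem_cons_self
    have hc0 : 0 ≤ c0 := by
      rcases (pvAllCMemIff L 0 c0).1 hc0mem with ⟨l, _, hpos⟩
      rcases (pvMemPos l.toList 0 c0).1 hpos with ⟨k, _, rfl, _⟩
      have := Int.natCast_nonneg k
      omega
    have hkR : ∃ k : Int, k ∈ R ∧ k ≤ 1000 := by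
      obtain ⟨l, hl, hml⟩ := hc1
      rcases List.mem_iff_getElem.1 hl with ⟨k, hk, hgl⟩
      have hk1001 : k < 1001 := lt_of_lt_of_le hk (by rw [List.length_take]; exact min_le_left _ _)
      have hkL : k < L.length := lt_of_lt_of_le hk (by rw [List.length_take]; exact min_le_right _ _)
      have hgl' : L[k] = l := by rw [← hgl, List.getElem_take]
      exact ⟨(k : Int), (hRiff _).2 ⟨k, hkL, rfl, by rw [hgl']; exact hml⟩,
        by exact_mod_cast Nat.lt_succ_iff.1 hk1001⟩
    have hkC : ∃ k : Int, k ∈ C ∧ k ≤ 1000 := by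
      obtain ⟨l, hl, hml⟩ := hc2
      rcases List.mem_iff_getElem.1 hml with ⟨j, hj, hgl⟩
      have hj1001 : j < 1001 := lt_of_lt_of_le hj (by rw [List.length_take]; exact min_le_left _ _)
      have hjl : j < l.toList.length := lt_of_lt_of_le hj (by rw [List.length_take]; exact min_le_right _ _)
      have hgl' : l.toList[j] = '#' := by rw [← List.getElem_take (j := 1001)]; exact hgl
      refine ⟨(j : Int), (pvAllCMemIff L 0 _).2 ⟨l, hl,
        (pvMemPos l.toList 0 _).2 ⟨j, hjl, by omega, hgl'⟩⟩,
        by exact_mod_cast Nat.lt_succ_iff.1 hj1001⟩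
    -- identify the four components with true min/max
    have hmaxR : R.foldl max (-1) = rs.foldl max r0 := by
      rw [hR, List.foldl_cons, max_eq_right (by omega : (-1 : Int) ≤ r0)]
    have hmaxC : C.foldl max (-1) = cs.foldl max c0 := by
      rw [hC, List.foldl_cons, max_eq_right (by omega : (-1 : Int) ≤ c0)]
    have hminR : R.foldl min 1000 = rs.foldl min r0 := by
      rw [hR, List.foldl_cons, pvFoldlMinMin rs 1000 r0, min_eq_right]
      obtain ⟨k, hkmem, hkle⟩ := hkR
      rw [hR] at hkmem
      exact le_trans (pvFoldlMinLe rs r0 k hkmem) hkle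
    have hminC : C.foldl min 1000 = cs.foldl min c0 := by
      rw [hC, List.foldl_cons, pvFoldlMinMin cs 1000 c0, min_eq_right]
      obtain ⟨k, hkmem, hkle⟩ := hkC
      rw [hC] at hkmem
      exact le_trans (pvFoldlMinLe cs c0 k hkmem) hkle
    -- rows factor = trimmed height, cols factor = trimmed width
    have hrows := pvCropLen L R r0 rs hRiff hR
    have hcols := pvCropLen _ (pvAllC L 0) c0 cs (fun x => pvColMemIff L x)
      (by rw [← hCdef]; exact hC)
    rw [hA, hBval, hmaxR, hmaxC, hminR, hminC, hrows, hcols]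
  · -- no '#' in plan at all: both sides are 0
    have hin' : PySem.Str.isIn "#" plan = false := by
      cases h : PySem.Str.isIn "#" plan
      · rfl
      · exact absurd h hin
    have hplan : '#' ∉ plan.toList := fun hmem => hin ((pvIsInStr plan).2 hmem)
    have hnolines : ∀ l ∈ L, '#' ∉ l.toList := by
      intro l hl hml
      have hcls : ∃ l ∈ PySem.Chars.splitlines (plan.toList.drop 1), '#' ∈ l :=
        hexIff.2 ⟨l, hl, hml⟩
      have : '#' ∈ plan.toList.drop 1 := (pvSplitMem _).1 hcls
      exact hplan (List.mem_of_mem_drop this)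
    rw [house, if_pos hin', hBval, pvTrimNil L hnolines]
    simp

set_option maxHeartbeats 1600000 in
theorem house_changed : Claim_changed_house := by
  unfold Claim_changed_house; decide
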